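-- pv_equiv track=rewrite | github.com/mcnavy/Hclustering | main.py | compute_pairwise_distances
-- ===== SOURCE A (Python) =====
-- def compute_pairwise_distances(data):
--     result = []
--     done = []
--     for i in data.keys():
--         for j in data.keys():
--             if i != j:
--                 if [i, j] not in done:
--                     dist = min(abs(data[i][0] - data[j][0]), abs(data[i][0] - data[j][1]), abs(data[i][1] - data[j][0]),
--                                abs(data[i][1] - data[j][1]))
--                     result.append((dist, [i, j]))
--                     done.append([j, i])
--     result.sort()
--     return result
-- ===== SOURCE B (Python) =====
-- def compute_pairwise_distances(data):
--     keys = list(data.keys())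
--     result = []
--     while keys:
--         i = keys.pop(0)
--         for j in keys:
--             dist = min(abs(data[i][0] - data[j][0]), abs(data[i][0] - data[j][1]),
--                        abs(data[i][1] - data[j][0]), abs(data[i][1] - data[j][1]))
--             result.append((dist, [i, j]))
--     result.sort()
--     return result
-- ===== Notes on version B (the rewrite author's own statement) =====
-- stated objective: faster
-- what changed: B drops A's 'done' bookkeeping list and its linear membership scan per candidate pair: it consumes the key list front-to-back, pairing each key only with the keys still remaining, so every unordered pair is produced exactly once by construction.
import Mathlib
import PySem

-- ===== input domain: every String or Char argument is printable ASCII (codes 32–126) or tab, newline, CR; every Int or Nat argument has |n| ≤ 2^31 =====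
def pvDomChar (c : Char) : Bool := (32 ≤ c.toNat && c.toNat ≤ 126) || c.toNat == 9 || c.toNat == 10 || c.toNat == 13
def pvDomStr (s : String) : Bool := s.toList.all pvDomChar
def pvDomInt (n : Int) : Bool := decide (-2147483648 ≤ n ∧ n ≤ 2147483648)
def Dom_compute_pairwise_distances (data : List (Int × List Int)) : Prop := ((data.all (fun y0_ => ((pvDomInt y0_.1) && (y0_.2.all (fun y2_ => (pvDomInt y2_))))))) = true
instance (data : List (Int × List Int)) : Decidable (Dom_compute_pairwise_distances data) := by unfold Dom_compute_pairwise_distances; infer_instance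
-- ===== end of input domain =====

-- B replaces A's 'done' bookkeeping list (with its linear membership scan per pair) by
-- consuming the key list front-to-back, pairing each key only with the keys still remaining.

-- shared helper: the distance expression both Pythons compute for a pair of keys
-- (data[i][0], data[i][1] ported via PySem.List.pyGetD; in range under Pre_)
def pvDist (d : PySem.Dict Int (List Int)) (i j : Int) : Int :=
  let vi := d.getD i []
  let vj := d.getD j []
  min (min (min |PySem.List.pyGetD vi 0 0 - PySem.List.pyGetD vj 0 0|
                |PySem.List.pyGetD vi 0 0 - PySem.List.pyGetD vj 1 0|)
           |PySem.List.pyGetD vi 1 0 - PySem.List.pyGetD vj 0 0|)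
      |PySem.List.pyGetD vi 1 0 - PySem.List.pyGetD vj 1 0|

-- ===== PORT A =====
-- body of A's inner loop: state = (result, done)
def pvStep (d : PySem.Dict Int (List Int)) (i : Int)
    (st : List (Int × List Int) × List (List Int)) (j : Int) :
    List (Int × List Int) × List (List Int) :=
  if i ≠ j then
    if [i, j] ∉ st.2 then
      (st.1 ++ [(pvDist d i j, [i, j])], st.2 ++ [[j, i]])
    else st
  else st

def compute_pairwise_distances (data : List (Int × List Int)) : List (Int × List Int) :=
  let d := PySem.Dict.ofList data
  let ks := d.keys
  let st := ks.foldl (fun st i => ks.foldl (pvStep d i) st) ([], [])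
  PySem.List.sorted2 st.1 (fun r => r.1) (fun r => r.2)

-- ===== PORT B =====
-- B's while-loop: pop the first key, pair it with every key still in the list, recurse
def pvPairs (d : PySem.Dict Int (List Int)) : List Int → List (Int × List Int)
  | [] => []
  | i :: rest => rest.map (fun j => (pvDist d i j, [i, j])) ++ pvPairs d rest

def compute_pairwise_distances_alt (data : List (Int × List Int)) : List (Int × List Int) :=
  let d := PySem.Dict.ofList data
  PySem.List.sorted2 (pvPairs d d.keys) (fun r => r.1) (fun r => r.2)

-- ===== PRECONDITION & SPEC =====
-- Pre_ excludes exactly the inputs where Python A raises IndexError: a dict with at least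
-- two keys and some value list of length < 2 (every value gets indexed at [0] and [1] then).
def Pre_compute_pairwise_distances (data : List (Int × List Int)) : Prop :=
  2 ≤ (PySem.Dict.ofList data).keys.length →
    ∀ v ∈ (PySem.Dict.ofList data).values, 2 ≤ v.length
instance (data : List (Int × List Int)) : Decidable (Pre_compute_pairwise_distances data) := by
  unfold Pre_compute_pairwise_distances; infer_instance

def pvWitness_compute_pairwise_distances : (List (Int × List Int)) := [(0, [0, 1]), (3, [5, 9])]

def Spec_compute_pairwise_distances (data : List (Int × List Int)) (out : List (Int × List Int)) : Prop := out = compute_pairwise_distances_alt data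
instance (data : List (Int × List Int)) (out : List (Int × List Int)) : Decidable (Spec_compute_pairwise_distances data out) := by unfold Spec_compute_pairwise_distances; infer_instance

-- ===== CLAIM (what is proved, stated in full; the proofs are below) =====
def Claim_equal_compute_pairwise_distances : Prop := ∀ (data : List (Int × List Int)), Dom_compute_pairwise_distances data → Pre_compute_pairwise_distances data → Spec_compute_pairwise_distances data (compute_pairwise_distances data)

-- ===== LEMMAS AND PROOFS =====

-- Inner loop of A at outer key i: if done answers '[i,j] ∈ done ↔ j ∈ pre', the loop emits a
-- pair exactly for the j with j ≠ i and j ∉ pre, appending results and done entries in order.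
theorem pv_inner_eq (d : PySem.Dict Int (List Int)) (i : Int) (pre : List Int) :
    ∀ (L : List Int) (res : List (Int × List Int)) (done : List (List Int)),
    (∀ j : Int, [i, j] ∈ done ↔ j ∈ pre) →
    L.foldl (pvStep d i) (res, done)
      = (res ++ (L.filter (fun j => decide (j ≠ i ∧ j ∉ pre))).map (fun j => (pvDist d i j, [i, j])),
         done ++ (L.filter (fun j => decide (j ≠ i ∧ j ∉ pre))).map (fun j => [j, i])) := by
  intro L
  induction L with
  | nil => intro res done _; simp
  | cons j L' ih =>
    intro res done hdone
    by_cases hij : j = i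
    · subst hij
      simp [pvStep, ih res done hdone]
    · by_cases hpre : j ∈ pre
      · have : [i, j] ∈ done := (hdone j).mpr hpre
        simp [pvStep, Ne.symm hij, this, hpre, hij, ih res done hdone]
      · have hnot : [i, j] ∉ done := fun h => hpre ((hdone j).mp h)
        have hdone' : ∀ j' : Int, [i, j'] ∈ done ++ [[j, i]] ↔ j' ∈ pre := by
          intro j'
          simp only [List.mem_append, List.mem_singleton]
          constructor
          · rintro (h | h)
            · exact (hdone j').mp h
            · exfalso; injection h with h1 _; exact hij h1.symm
          · intro h; exact Or.inl ((hdone j').mpr h)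
        have hstep : pvStep d i (res, done) j
            = (res ++ [(pvDist d i j, [i, j])], done ++ [[j, i]]) := by
          simp [pvStep, Ne.symm hij, hnot]
        rw [List.foldl_cons, hstep, ih _ _ hdone']
        simp [hij, hpre, List.append_assoc]

-- On the keys list pre ++ i :: out' (no duplicates), the filter above keeps exactly out'.
theorem pv_filter_triangle (pre : List Int) (i : Int) (out' : List Int)
    (hnd : (pre ++ i :: out').Nodup) :
    (pre ++ i :: out').filter (fun j => decide (j ≠ i ∧ j ∉ pre)) = out' := by
  rw [List.nodup_append] at hnd
  obtain ⟨-, hnd2, hdisj⟩ := hnd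
  rw [List.nodup_cons] at hnd2
  rw [List.filter_append]
  have h1 : pre.filter (fun j => decide (j ≠ i ∧ j ∉ pre)) = [] := by
    rw [List.filter_eq_nil_iff]
    intro a ha
    simp only [decide_eq_true_eq, not_and, not_not]
    intro _; exact ha
  have h2 : (i :: out').filter (fun j => decide (j ≠ i ∧ j ∉ pre)) = out' := by
    rw [List.filter_cons_of_neg (by simp), List.filter_eq_self]
    intro a ha
    simp only [decide_eq_true_eq]
    exact ⟨fun h => hnd2.1 (h ▸ ha), fun h => hdisj a h a (List.mem_cons_of_mem _ ha) rfl⟩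
  rw [h1, h2, List.nil_append]
theorem pv_outer_eq (d : PySem.Dict Int (List Int)) (ks : List Int) (hnd : ks.Nodup) :
    ∀ (out pre : List Int) (res : List (Int × List Int)) (done : List (List Int)),
    ks = pre ++ out →
    (∀ i ∈ out, ∀ j : Int, [i, j] ∈ done ↔ j ∈ pre) →
    (out.foldl (fun st i => ks.foldl (pvStep d i) st) (res, done)).1 = res ++ pvPairs d out := by
  intro out
  induction out with
  | nil => intro pre res done _ _; simp [pvPairs]
  | cons i out' ih =>
    intro pre res done hks hinv
    have hksnd : (pre ++ i :: out').Nodup := hks ▸ hnd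
    have hfilter := pv_filter_triangle pre i out' hksnd
    simp only [List.foldl_cons]
    rw [hks, pv_inner_eq d i pre (pre ++ i :: out') res done (hinv i (List.mem_cons_self)), hfilter, ← hks]
    have hinv' : ∀ i' ∈ out', ∀ j : Int,
        [i', j] ∈ done ++ out'.map (fun j => [j, i]) ↔ j ∈ pre ++ [i] := by
      intro i' hi' j
      simp only [List.mem_append, List.mem_map, List.mem_singleton]
      constructor
      · rintro (h | ⟨j', hj', heq⟩)
        · exact Or.inl ((hinv i' (List.mem_cons_of_mem _ hi') j).mp h)
        · injection heq with h1 h2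
          injection h2 with h2 _
          exact Or.inr h2.symm
      · rintro (h | h)
        · exact Or.inl ((hinv i' (List.mem_cons_of_mem _ hi') j).mpr h)
        · exact Or.inr ⟨i', hi', by rw [h]⟩
    rw [ih (pre ++ [i]) _ _ (by rw [hks, List.append_assoc]; rfl) hinv']
    simp [pvPairs, List.append_assoc]

-- ===== VERDICT (by name: the statement is the Claim_ definition above) =====
theorem compute_pairwise_distances_spec : Claim_equal_compute_pairwise_distances := by
  intro data _ _
  simp only [Spec_compute_pairwise_distances, compute_pairwise_distances,
    compute_pairwise_distances_alt]
  have hnd : (PySem.Dict.ofList data).keys.Nodup := PySem.Dict.nodup_keys_ofList data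
  rw [pv_outer_eq (PySem.Dict.ofList data) _ hnd _ [] [] [] (by simp) (by simp)]
  simp
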